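-- pv_equiv track=rewrite | github.com/tiagyu/Algorithms_python | 프로그래머스/2/42586. 기능개발/기능개발.py | solution
-- ===== SOURCE A (Python) =====
-- def solution(progresses, speeds):
--     # 남은 작업 기간 계산
--     days = []
--     for p,s in zip(progresses, speeds):
--         last_days = (100-p)
--         # 남은 일수 올림
--         if last_days % s == 0:
--             days.append(last_days // s)
--         else:
--             days.append((last_days // s) + 1)
--
--     result = []
--     # 첫 번째 기능의 배포 일자를 기준으로 설정
--     current_day = days[0]
--     count = 1
--
--     # 각 기능의 배포 일자 비교
--     for i in range(1, len(days)):
--         if days[i] <= current_day: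
--             # 현재 배포 일자보다 뒤의 기능이 먼저 끝나면 같이 배포
--             count+=1
--         else:
--             # 새로 배포 일자를 갱신하고 결과에 추가
--             result.append(count)
--             current_day = days[i]
--             count = 1
--
--     # 마지막 남은 기능들의 배포 수 추가
--     result.append(count)
--
--     return result
-- ===== SOURCE B (Python) =====
-- def running_max(days):
--     # prefix maxima: each feature is labelled with the day its batch ships
--     m = days[0]                      # IndexError on empty input, as in the original
--     out = []
--     for d in days:
--         m = max(m, d)
--         out.append(m)
--     return out
--
--
-- def run_lengths(xs):
--     # lengths of maximal runs of consecutive equal values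
--     result = []
--     count = 0
--     prev = xs[0]
--     for x in xs:
--         if x == prev:
--             count += 1
--         else:
--             result.append(count)
--             prev, count = x, 1
--     result.append(count)
--     return result
--
--
-- def solution(progresses, speeds):
--     # ceiling division with ints: -((p-100)//s) == ceil((100-p)/s)
--     days = [-((p - 100) // s) for p, s in zip(progresses, speeds)]
--     return run_lengths(running_max(days))
-- ===== Notes on version B (the rewrite author's own statement) =====
-- stated objective: alternative
-- what changed: B computes days with one-expression ceiling division, labels each feature with the running maximum of days (its batch leader), and returns the run-lengths of consecutive equal labels, instead of A's fused scan with a current_day/count state machine.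
import Mathlib
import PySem

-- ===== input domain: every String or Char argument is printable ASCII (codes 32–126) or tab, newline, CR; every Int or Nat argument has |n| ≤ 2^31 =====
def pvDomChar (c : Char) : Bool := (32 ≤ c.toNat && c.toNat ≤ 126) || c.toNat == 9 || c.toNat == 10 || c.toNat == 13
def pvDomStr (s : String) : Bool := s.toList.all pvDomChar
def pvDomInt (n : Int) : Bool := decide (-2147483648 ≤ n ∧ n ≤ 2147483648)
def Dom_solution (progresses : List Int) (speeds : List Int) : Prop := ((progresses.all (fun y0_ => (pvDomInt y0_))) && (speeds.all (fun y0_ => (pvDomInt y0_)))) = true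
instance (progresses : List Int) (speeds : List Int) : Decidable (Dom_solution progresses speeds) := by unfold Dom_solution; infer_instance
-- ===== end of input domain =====

-- B relabels the task: per-feature completion days, running-max batch labels, then run-lengths of equal labels,
-- instead of A's fused current_day/count scan. Same O(n) cost; different decomposition.


-- ===== PORT A =====
-- the 'for i in range(1, len(days))' loop, reading days[i] in order with state (result, current_day, count)
def goA (result : List Int) (cur : Int) (cnt : Int) : List Int → List Int
  | [] => result ++ [cnt]
  | d :: ds => if d ≤ cur then goA result cur (cnt + 1) ds else goA (result ++ [cnt]) d 1 ds

def solution (progresses : List Int) (speeds : List Int) : List Int :=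
  let days := (progresses.zip speeds).foldl (fun days ps =>
    let last_days := 100 - ps.1
    if PySem.Int.mod last_days ps.2 = 0 then days ++ [PySem.Int.floordiv last_days ps.2]
    else days ++ [PySem.Int.floordiv last_days ps.2 + 1]) []
  match days with
  | [] => []                       -- Python: days[0] raises IndexError here (outside Pre_)
  | d0 :: rest => goA [] d0 1 rest

-- ===== PORT B =====
-- running_max's loop: m is the running maximum, each step appends the new m
def runMaxB (m : Int) : List Int → List Int
  | [] => []
  | d :: ds => (max m d) :: runMaxB (max m d) ds

-- run_lengths' loop with state (result via back-to-front build, prev, count)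
def runLenB (prev : Int) (count : Int) : List Int → List Int
  | [] => [count]
  | x :: xs => if x = prev then runLenB prev (count + 1) xs else count :: runLenB x 1 xs

def solution_alt (progresses : List Int) (speeds : List Int) : List Int :=
  let days := (progresses.zip speeds).map (fun ps => -(PySem.Int.floordiv (ps.1 - 100) ps.2))
  match days with
  | [] => []                       -- Python: days[0] in running_max raises IndexError here (outside Pre_)
  | d0 :: _ =>
    match runMaxB d0 days with
    | [] => []
    | x0 :: xs => runLenB x0 0 (x0 :: xs)

-- ===== PRECONDITION & SPEC =====
-- Pre_ excludes exactly the inputs where Python A raises: an empty zip (days[0] → IndexError)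
-- and a zero speed among the zipped pairs (ZeroDivisionError).
def Pre_solution (progresses : List Int) (speeds : List Int) : Prop :=
  progresses ≠ [] ∧ speeds ≠ [] ∧ ∀ ps ∈ progresses.zip speeds, ps.2 ≠ 0
instance (progresses : List Int) (speeds : List Int) : Decidable (Pre_solution progresses speeds) := by
  unfold Pre_solution; infer_instance

def pvWitness_solution : List Int × List Int := ([93, 30, 55], [1, 30, 5])

def Spec_solution (progresses : List Int) (speeds : List Int) (out : List Int) : Prop := out = solution_alt progresses speeds
instance (progresses : List Int) (speeds : List Int) (out : List Int) : Decidable (Spec_solution progresses speeds out) := by unfold Spec_solution; infer_instance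

-- ===== CLAIM (what is proved, stated in full; the proofs are below) =====
def Claim_equal_solution : Prop := ∀ (progresses : List Int) (speeds : List Int), Dom_solution progresses speeds → Pre_solution progresses speeds → Spec_solution progresses speeds (solution progresses speeds)

-- ===== LEMMAS AND PROOFS =====

-- Python int ceiling: A's (a//s, +1 unless exact) equals B's -((-a)//s), for every nonzero s
theorem ceil_eq_pos (a s : Int) (hs : 0 < s) :
    (if PySem.Int.mod a s = 0 then PySem.Int.floordiv a s else PySem.Int.floordiv a s + 1)
      = -(PySem.Int.floordiv (-a) s) := by
  have h := PySem.Int.floordiv_mul_add_mod a s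
  have h0 := PySem.Int.mod_nonneg a hs
  have h1 := PySem.Int.mod_lt a hs
  symm
  split_ifs with hm
  · exact (PySem.Int.neg_floordiv_neg_eq_iff_of_pos hs).mpr ⟨by nlinarith, by nlinarith⟩
  · have hm' : 0 < PySem.Int.mod a s := lt_of_le_of_ne h0 (Ne.symm hm)
    exact (PySem.Int.neg_floordiv_neg_eq_iff_of_pos hs).mpr ⟨by nlinarith, by nlinarith⟩

theorem ceil_eq (a s : Int) (hs : s ≠ 0) :
    (if PySem.Int.mod a s = 0 then PySem.Int.floordiv a s else PySem.Int.floordiv a s + 1)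
      = -(PySem.Int.floordiv (-a) s) := by
  rcases lt_or_gt_of_ne hs with hneg | hpos
  · have e1 : PySem.Int.floordiv a s = PySem.Int.floordiv (-a) (-s) := by
      have := PySem.Int.floordiv_neg_neg (-a) (-s); simpa using this.symm
    have e2 : PySem.Int.mod a s = -(PySem.Int.mod (-a) (-s)) := by
      have := PySem.Int.mod_neg_neg (-a) (-s); simpa using this.symm
    have e3 : PySem.Int.floordiv (-a) s = PySem.Int.floordiv a (-s) := by
      have := PySem.Int.floordiv_neg_neg a (-s); simpa using this
    rw [e1, e2, e3]
    have := ceil_eq_pos (-a) (-s) (by omega)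
    simpa [neg_eq_zero] using this
  · exact ceil_eq_pos a s hpos

-- A's foldl-append day builder, generalized over the accumulator, as a map
theorem daysA_eq_map (l : List (Int × Int)) (acc : List Int) (h : ∀ ps ∈ l, ps.2 ≠ 0) :
    l.foldl (fun days ps =>
      let last_days := 100 - ps.1
      if PySem.Int.mod last_days ps.2 = 0 then days ++ [PySem.Int.floordiv last_days ps.2]
      else days ++ [PySem.Int.floordiv last_days ps.2 + 1]) acc
    = acc ++ l.map (fun ps => -(PySem.Int.floordiv (ps.1 - 100) ps.2)) := by
  induction l generalizing acc with
  | nil => simp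
  | cons p l ih =>
    have hp : p.2 ≠ 0 := h p (by simp)
    have hrest : ∀ ps ∈ l, ps.2 ≠ 0 := fun ps hm => h ps (by simp [hm])
    have hc := ceil_eq (100 - p.1) p.2 hp
    have hneg : -(100 - p.1) = p.1 - 100 := by ring
    simp only [List.foldl_cons, List.map_cons]
    rw [ih _ hrest]
    by_cases hm : PySem.Int.mod (100 - p.1) p.2 = 0 <;>
      simp_all [List.append_assoc]

-- A's scan equals run-lengths of the running maxima
theorem goA_eq (ds : List Int) : ∀ (res : List Int) (cur cnt : Int),
    goA res cur cnt ds = res ++ runLenB cur cnt (runMaxB cur ds) := by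
  induction ds with
  | nil => intro res cur cnt; simp [goA, runLenB, runMaxB]
  | cons d ds ih =>
    intro res cur cnt
    by_cases hle : d ≤ cur
    · have hmax : max cur d = cur := by omega
      simp [goA, runMaxB, runLenB, hle, ih]
    · have hmax : max cur d = d := by omega
      have hne : ¬ d = cur := by omega
      simp [goA, runMaxB, runLenB, hle, hmax, hne, ih, List.append_assoc]

-- ===== VERDICT (by name: the statement is the Claim_ definition above) =====
theorem solution_spec : Claim_equal_solution := by
  intro progresses speeds _ hpre
  obtain ⟨hp, hs, hz⟩ := hpre
  unfold Spec_solution solution solution_alt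
  have hzip : progresses.zip speeds ≠ [] := by
    cases progresses with
    | nil => exact absurd rfl hp
    | cons a as => cases speeds with
      | nil => exact absurd rfl hs
      | cons b bs => simp [List.zip]
  rw [daysA_eq_map _ [] hz]
  simp only [List.nil_append]
  cases hdays : (progresses.zip speeds).map (fun ps => -(PySem.Int.floordiv (ps.1 - 100) ps.2)) with
  | nil => exact absurd (List.map_eq_nil_iff.mp hdays) hzip
  | cons d0 rest =>
    simp [goA_eq, runMaxB, runLenB]
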